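-- pv_equiv track=rewrite | github.com/IvanYachUkr/Tessera | src/splitting.py | _farthest_point_seeds
-- ===== SOURCE A (Python) =====
-- def _tile_manhattan(t1, t2, n_tile_cols):
--     """Manhattan distance between two tiles on the grid."""
--     r1, c1 = t1 // n_tile_cols, t1 % n_tile_cols
--     r2, c2 = t2 // n_tile_cols, t2 % n_tile_cols
--     return abs(r1 - r2) + abs(c1 - c2)
--
-- def _farthest_point_seeds(unique_tiles, n_folds, n_tile_cols, start_tile):
--     """Pick K seed tiles maximally spread via greedy farthest-point."""
--     seeds = [start_tile]
--     for _ in range(1, n_folds):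
--         best_tile = None
--         best_min_dist = -1
--         for t in unique_tiles:
--             if t in seeds:
--                 continue
--             min_d = min(_tile_manhattan(t, s, n_tile_cols) for s in seeds)
--             if min_d > best_min_dist:
--                 best_min_dist = min_d
--                 best_tile = t
--         seeds.append(best_tile)
--     return seeds
-- ===== SOURCE B (Python) =====
-- def _farthest_point_seeds(unique_tiles, n_folds, n_tile_cols, start_tile):
--     """Greedy farthest-point seeds via a shrinking (tile, min-dist) worklist:
--     each round scans once for the max and updates min-dists against the new
--     seed only (O(n_folds * len(unique_tiles)) instead of O(n_folds^2 * ...))."""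
--     seeds = [start_tile]
--     if n_folds <= 1:
--         return seeds
--
--     def d(a, b):
--         return (abs(a // n_tile_cols - b // n_tile_cols)
--                 + abs(a % n_tile_cols - b % n_tile_cols))
--
--     rem = [(t, d(t, start_tile)) for t in unique_tiles if t != start_tile]
--     for _ in range(1, n_folds):
--         best_t, best_d = rem[0]
--         for t, dd in rem[1:]:
--             if dd > best_d:
--                 best_t, best_d = t, dd
--         seeds.append(best_t)
--         rem = [(t, min(dd, d(t, best_t))) for t, dd in rem if t != best_t]
--     return seeds
-- ===== Notes on version B (the rewrite author's own statement) =====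
-- stated objective: faster
-- what changed: B keeps a shrinking worklist of (tile, min-distance-to-seeds) pairs, picking each round's farthest tile in one scan and updating distances against the newest seed only, instead of A's per-candidate min over all seeds plus list membership tests; intended as faster (probe measured ~27x at the largest size both finished, unconfirmed beyond).
-- outside the precondition, e.g. on _farthest_point_seeds([], 2, 1, 0): A returns [0, None], B raises IndexError
import Mathlib
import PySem

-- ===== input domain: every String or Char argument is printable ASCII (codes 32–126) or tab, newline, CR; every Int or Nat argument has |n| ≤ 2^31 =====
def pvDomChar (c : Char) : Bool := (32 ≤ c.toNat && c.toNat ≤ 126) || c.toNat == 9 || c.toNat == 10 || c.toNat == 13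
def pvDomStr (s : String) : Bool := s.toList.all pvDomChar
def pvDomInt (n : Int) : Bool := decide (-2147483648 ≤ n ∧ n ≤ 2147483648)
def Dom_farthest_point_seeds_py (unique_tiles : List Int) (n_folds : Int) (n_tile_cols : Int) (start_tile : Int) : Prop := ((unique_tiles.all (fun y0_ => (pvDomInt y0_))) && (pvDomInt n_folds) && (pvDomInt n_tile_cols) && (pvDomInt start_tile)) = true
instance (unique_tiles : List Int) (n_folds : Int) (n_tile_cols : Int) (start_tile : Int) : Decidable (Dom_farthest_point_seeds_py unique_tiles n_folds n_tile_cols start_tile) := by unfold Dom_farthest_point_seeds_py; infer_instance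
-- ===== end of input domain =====

-- B replaces A's per-round "min distance over all seeds + membership scan" by a shrinking
-- worklist of (tile, min-dist) pairs updated only against the newest seed; intended as faster
-- (timing run measured ~27x at the largest size both programs finished).


-- ===== PORT A =====
-- _tile_manhattan(t1, t2, n_tile_cols)
def pvTileManhattan (t1 t2 n_tile_cols : Int) : Int :=
  let r1 := PySem.Int.floordiv t1 n_tile_cols
  let c1 := PySem.Int.mod t1 n_tile_cols
  let r2 := PySem.Int.floordiv t2 n_tile_cols
  let c2 := PySem.Int.mod t2 n_tile_cols
  |r1 - r2| + |c1 - c2|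

-- min(_tile_manhattan(t, s, n_tile_cols) for s in seeds); seeds is nonempty wherever Python evaluates it
def pvMinD (t : Int) (seeds : List Int) (n : Int) : Int :=
  match seeds with
  | [] => 0  -- unreachable (Python's min would raise on an empty generator)
  | s :: rest => rest.foldl (fun m s' => min m (pvTileManhattan t s' n)) (pvTileManhattan t s n)

-- one iteration of A's outer loop (the body of `for _ in range(1, n_folds)`)
def pvRoundA (unique_tiles : List Int) (n_tile_cols : Int) (seeds : List Int) : List Int :=
  let r := unique_tiles.foldl
    (fun (st : Option Int × Int) t =>
      if seeds.contains t then st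
      else
        let min_d := pvMinD t seeds n_tile_cols
        if min_d > st.2 then (some t, min_d) else st)
    ((none : Option Int), -1)
  seeds ++ [r.1.getD 0]  -- .getD 0 unreachable under Pre_ (there Python's best_tile is never None)

def farthest_point_seeds_py (unique_tiles : List Int) (n_folds : Int) (n_tile_cols : Int) (start_tile : Int) : List Int :=
  (PySem.List.pyRange 1 n_folds 1).foldl (fun seeds _ => pvRoundA unique_tiles n_tile_cols seeds) [start_tile]

-- ===== PORT B =====
-- d(a, b) of Source B
def pvDistB (a b n_tile_cols : Int) : Int :=
  |PySem.Int.floordiv a n_tile_cols - PySem.Int.floordiv b n_tile_cols|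
    + |PySem.Int.mod a n_tile_cols - PySem.Int.mod b n_tile_cols|

-- best_t, best_d = rem[0]; strict-> replacement scanning rem[1:]
def pvBestOf (hd : Int × Int) (tl : List (Int × Int)) : Int × Int :=
  tl.foldl (fun best p => if p.2 > best.2 then p else best) hd

-- one iteration of B's loop on the state (seeds, rem)
def pvRoundB (n_tile_cols : Int) (st : List Int × List (Int × Int)) : List Int × List (Int × Int) :=
  match st.2 with
  | [] => st  -- unreachable under Pre_ (Python's rem[0] raises IndexError there)
  | p :: tl =>
    let best := pvBestOf p tl
    (st.1 ++ [best.1],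
     ((p :: tl).filter (fun q => q.1 != best.1)).map
       (fun q => (q.1, min q.2 (pvDistB q.1 best.1 n_tile_cols))))

def farthest_point_seeds_py_alt (unique_tiles : List Int) (n_folds : Int) (n_tile_cols : Int) (start_tile : Int) : List Int :=
  if n_folds ≤ 1 then [start_tile]
  else
    let rem0 := (unique_tiles.filter (fun t => t != start_tile)).map
      (fun t => (t, pvDistB t start_tile n_tile_cols))
    ((PySem.List.pyRange 1 n_folds 1).foldl (fun acc _ => pvRoundB n_tile_cols acc)
      ([start_tile], rem0)).1

-- ===== PRECONDITION & SPEC =====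
-- Pre_ excludes exactly the inputs where A raises (ZeroDivisionError for n_tile_cols = 0,
-- TypeError once a None seed enters a distance computation) or returns a list containing
-- None instead of ints (fewer distinct non-start candidate tiles than the n_folds - 1
-- rounds need); B raises IndexError on those inputs.
def Pre_farthest_point_seeds_py (unique_tiles : List Int) (n_folds : Int) (n_tile_cols : Int) (start_tile : Int) : Prop :=
  n_folds ≤ 1 ∨ (n_tile_cols ≠ 0 ∧
    n_folds - 1 ≤ ((unique_tiles.filter (fun t => t != start_tile)).toFinset.card : Int))
instance (unique_tiles : List Int) (n_folds : Int) (n_tile_cols : Int) (start_tile : Int) : Decidable (Pre_farthest_point_seeds_py unique_tiles n_folds n_tile_cols start_tile) := by unfold Pre_farthest_point_seeds_py; infer_instance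

def pvWitness_farthest_point_seeds_py : List Int × Int × Int × Int := ([0, 3, 5], 2, 2, 1)

def Spec_farthest_point_seeds_py (unique_tiles : List Int) (n_folds : Int) (n_tile_cols : Int) (start_tile : Int) (out : List Int) : Prop := out = farthest_point_seeds_py_alt unique_tiles n_folds n_tile_cols start_tile
instance (unique_tiles : List Int) (n_folds : Int) (n_tile_cols : Int) (start_tile : Int) (out : List Int) : Decidable (Spec_farthest_point_seeds_py unique_tiles n_folds n_tile_cols start_tile out) := by unfold Spec_farthest_point_seeds_py; infer_instance

-- ===== CLAIM (what is proved, stated in full; the proofs are below) =====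
def Claim_equal_farthest_point_seeds_py : Prop := ∀ (unique_tiles : List Int) (n_folds : Int) (n_tile_cols : Int) (start_tile : Int), Dom_farthest_point_seeds_py unique_tiles n_folds n_tile_cols start_tile → Pre_farthest_point_seeds_py unique_tiles n_folds n_tile_cols start_tile → Spec_farthest_point_seeds_py unique_tiles n_folds n_tile_cols start_tile (farthest_point_seeds_py unique_tiles n_folds n_tile_cols start_tile)

-- ===== LEMMAS AND PROOFS =====

theorem pvTileManhattan_nonneg (t s n : Int) : 0 ≤ pvTileManhattan t s n := by
  unfold pvTileManhattan; positivity

theorem foldl_min_nonneg (t n : Int) (rest : List Int) :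
    ∀ init : Int, 0 ≤ init → 0 ≤ rest.foldl (fun m s' => min m (pvTileManhattan t s' n)) init := by
  induction rest with
  | nil => intro i h; simpa using h
  | cons s tl ih =>
    intro i h
    simp only [List.foldl_cons]
    exact ih _ (le_min h (pvTileManhattan_nonneg t s n))

theorem pvMinD_nonneg (t : Int) (seeds : List Int) (n : Int) (h : seeds ≠ []) :
    0 ≤ pvMinD t seeds n := by
  cases seeds with
  | nil => exact absurd rfl h
  | cons s rest => exact foldl_min_nonneg t n rest _ (pvTileManhattan_nonneg t s n)

theorem pvMinD_append (t : Int) (seeds : List Int) (b n : Int) (h : seeds ≠ []) :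
    pvMinD t (seeds ++ [b]) n = min (pvMinD t seeds n) (pvTileManhattan t b n) := by
  cases seeds with
  | nil => exact absurd rfl h
  | cons s rest => simp [pvMinD, List.foldl_append]

theorem foldl_best (tl : List (Int × Int)) (b : Int × Int) :
    tl.foldl (fun (st : Option Int × Int) q => if q.2 > st.2 then (some q.1, q.2) else st)
      (some b.1, b.2)
    = (some (pvBestOf b tl).1, (pvBestOf b tl).2) := by
  induction tl generalizing b with
  | nil => rfl
  | cons q tl ih =>
    simp only [List.foldl_cons, pvBestOf]
    by_cases h : q.2 > b.2
    · simp only [h, if_pos]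
      exact ih q
    · simp only [h, if_false]
      exact ih b

theorem pvBestOf_mem (b : Int × Int) (tl : List (Int × Int)) : pvBestOf b tl ∈ b :: tl := by
  induction tl generalizing b with
  | nil => simp [pvBestOf]
  | cons q tl ih =>
    unfold pvBestOf at ih ⊢
    simp only [List.foldl_cons]
    by_cases h : q.2 > b.2
    · simp only [h, if_pos]
      exact List.mem_cons_of_mem b (ih q)
    · simp only [h, ite_false]
      rcases List.mem_cons.mp (ih b) with h1 | h1
      · rw [h1]; exact List.mem_cons_self
      · exact List.mem_cons_of_mem b (List.mem_cons_of_mem q h1)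

-- A's candidate scan, rewritten over the worklist rem = map (t ↦ (t, minD)) (filter (∉ seeds))
theorem scanA_eq_rem (uniq seeds : List Int) (n : Int) (init : Option Int × Int) :
    uniq.foldl
      (fun (st : Option Int × Int) t =>
        if seeds.contains t then st
        else
          let min_d := pvMinD t seeds n
          if min_d > st.2 then (some t, min_d) else st)
      init
    = ((uniq.filter (fun t => !seeds.contains t)).map (fun t => (t, pvMinD t seeds n))).foldl
        (fun (st : Option Int × Int) q => if q.2 > st.2 then (some q.1, q.2) else st) init := by
  induction uniq generalizing init with
  | nil => rfl
  | cons t tl ih =>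
    by_cases h : seeds.contains t
    · simp only [List.foldl_cons, List.filter_cons, h, Bool.not_true, if_pos]
      exact ih init
    · simp only [List.foldl_cons, List.filter_cons, h, Bool.not_false, reduceIte,
        List.map_cons, Bool.false_eq_true]
      rw [ih]

theorem pvDistB' (a b n : Int) : (|PySem.Int.floordiv a n - PySem.Int.floordiv b n|
    + |PySem.Int.mod a n - PySem.Int.mod b n|) = pvTileManhattan a b n := rfl

-- one round of B's worklist update re-establishes the invariant for seeds ++ [b]
theorem rem_update (uniq seeds : List Int) (n b : Int) (hs : seeds ≠ []) :
    ((((uniq.filter (fun t => !seeds.contains t)).map (fun t => (t, pvMinD t seeds n))).filter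
        (fun q => q.1 != b)).map (fun q => (q.1, min q.2 (|PySem.Int.floordiv q.1 n - PySem.Int.floordiv b n| + |PySem.Int.mod q.1 n - PySem.Int.mod b n|))))
    = (uniq.filter (fun t => !(seeds ++ [b]).contains t)).map
        (fun t => (t, pvMinD t (seeds ++ [b]) n)) := by
  rw [List.filter_map, List.map_map, List.filter_filter]
  have h1 : (fun a => ((fun (q : Int × Int) => q.1 != b) ∘ fun t => (t, pvMinD t seeds n)) a && !seeds.contains a)
      = (fun t => !(seeds ++ [b]).contains t) := by
    funext t
    by_cases h : t = b <;> by_cases h2 : seeds.contains t <;>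
      simp [h, h2, List.contains_append, bne, Bool.and_comm]
  rw [h1]
  apply List.map_congr_left
  intro t _
  simp only [Function.comp]
  rw [pvDistB', pvMinD_append t seeds b n hs]

theorem filter_append_seed (uniq seeds : List Int) (b : Int) :
    uniq.filter (fun t => !(seeds ++ [b]).contains t)
      = (uniq.filter (fun t => !seeds.contains t)).filter (fun t => t != b) := by
  rw [List.filter_filter]
  apply List.filter_congr
  intro t _
  by_cases h : t = b <;> by_cases h2 : seeds.contains t <;>
    simp [h, h2, List.contains_append, bne, Bool.and_comm]

theorem card_filter_ne (l : List Int) (b : Int) (hb : b ∈ l) :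
    (l.filter (fun t => t != b)).toFinset.card = l.toFinset.card - 1 := by
  rw [List.toFinset_filter]
  have h1 : l.toFinset.filter (fun t => t != b) = l.toFinset.erase b := by
    rw [← Finset.filter_ne']
    apply Finset.filter_congr
    intro x _
    simp [bne]
  rw [h1, Finset.card_erase_of_mem (List.mem_toFinset.mpr hb)]

-- main invariant: the two folds agree as long as enough distinct candidates remain
theorem main_inv (uniq : List Int) (n : Int) :
    ∀ (L : List Int) (seeds : List Int), seeds ≠ [] →
      L.length ≤ ((uniq.filter (fun t => !seeds.contains t)).toFinset.card) →
      L.foldl (fun s _ => pvRoundA uniq n s) seeds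
        = (L.foldl (fun acc _ => pvRoundB n acc)
            (seeds, (uniq.filter (fun t => !seeds.contains t)).map
              (fun t => (t, pvMinD t seeds n)))).1 := by
  intro L
  induction L with
  | nil => intro seeds _ _; rfl
  | cons a L ih =>
    intro seeds hs hlen
    -- the filtered candidate list is nonempty
    obtain ⟨t0, l', hl⟩ : ∃ t0 l', uniq.filter (fun t => !seeds.contains t) = t0 :: l' := by
      cases hfl : uniq.filter (fun t => !seeds.contains t) with
      | nil => rw [hfl] at hlen; simp at hlen
      | cons t0 l' => exact ⟨t0, l', rfl⟩
    have hd0 : (0:Int) ≤ pvMinD t0 seeds n := pvMinD_nonneg t0 seeds n hs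
    set f : Int → Int × Int := fun t => (t, pvMinD t seeds n) with hf
    set best : Int × Int := pvBestOf (f t0) (l'.map f) with hbest
    -- best comes from the candidate list
    have hbmem : best ∈ (uniq.filter (fun t => !seeds.contains t)).map f := by
      rw [hl, List.map_cons]; exact pvBestOf_mem (f t0) (l'.map f)
    have hb1 : best.1 ∈ uniq.filter (fun t => !seeds.contains t) := by
      obtain ⟨t, ht, hft⟩ := List.mem_map.mp hbmem
      rw [← hft]; exact ht
    -- A's round produces seeds ++ [best.1]
    have hA : pvRoundA uniq n seeds = seeds ++ [best.1] := by
      unfold pvRoundA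
      rw [scanA_eq_rem uniq seeds n ((none : Option Int), -1), hl, List.map_cons,
        List.foldl_cons]
      have : ((if (f t0).2 > ((none : Option Int), (-1:Int)).2 then (some (f t0).1, (f t0).2)
          else ((none : Option Int), (-1:Int)))) = (some (f t0).1, (f t0).2) := by
        rw [if_pos]; show (pvMinD t0 seeds n) > -1; omega
      rw [this, foldl_best, ← hbest]
      rfl
    -- B's round produces the matching state
    have hB : pvRoundB n (seeds, (uniq.filter (fun t => !seeds.contains t)).map f)
        = (seeds ++ [best.1],
           (uniq.filter (fun t => !(seeds ++ [best.1]).contains t)).map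
             (fun t => (t, pvMinD t (seeds ++ [best.1]) n))) := by
      rw [hl, List.map_cons]
      show ((seeds ++ [best.1],
        (((f t0) :: l'.map f).filter (fun q => q.1 != best.1)).map
          (fun q => (q.1, min q.2 (pvDistB q.1 best.1 n)))) : List Int × List (Int × Int)) = _
      congr 1
      have := rem_update uniq seeds n best.1 hs
      rw [hl, List.map_cons] at this
      exact this
    have hcard : L.length ≤ ((uniq.filter (fun t => !(seeds ++ [best.1]).contains t)).toFinset.card) := by
      rw [filter_append_seed, card_filter_ne _ _ hb1]
      have := hlen
      simp only [List.length_cons] at this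
      omega
    simp only [List.foldl_cons]
    rw [hA, hB]
    exact ih (seeds ++ [best.1]) (by simp) hcard

-- ===== VERDICT (by name: the statement is the Claim_ definition above) =====
theorem farthest_point_seeds_py_spec : Claim_equal_farthest_point_seeds_py := by
  intro unique_tiles n_folds n_tile_cols start_tile _ hpre
  unfold Spec_farthest_point_seeds_py
  unfold farthest_point_seeds_py farthest_point_seeds_py_alt
  by_cases h1 : n_folds ≤ 1
  · rw [if_pos h1, PySem.List.pyRange_one_eq_nil (by omega)]
    rfl
  · rw [if_neg h1]
    have hcard : n_folds - 1 ≤ ((unique_tiles.filter (fun t => t != start_tile)).toFinset.card : Int) := by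
      rcases hpre with h | ⟨_, h⟩
      · omega
      · exact h
    have hfil : (unique_tiles.filter (fun t => t != start_tile))
        = unique_tiles.filter (fun t => !([start_tile] : List Int).contains t) := by
      apply List.filter_congr
      intro t _
      by_cases h : t = start_tile <;> simp [h, bne]
    have hrem : (unique_tiles.filter (fun t => t != start_tile)).map
        (fun t => (t, pvDistB t start_tile n_tile_cols))
        = (unique_tiles.filter (fun t => !([start_tile] : List Int).contains t)).map
            (fun t => (t, pvMinD t [start_tile] n_tile_cols)) := by
      rw [← hfil]
      apply List.map_congr_left
      intro t _
      rfl
    rw [hrem]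
    apply main_inv
    · simp
    · rw [PySem.List.length_pyRange_one, ← hfil]
      omega
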